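-- pv_equiv track=rewrite | github.com/LHCrossings/ctv-orderentry | browser_automation/parsers/admerasia_parser.py | _are_consecutive_days
-- ===== SOURCE A (Python) =====
-- from typing import List, Dict, Optional, Tuple
--
-- def _are_consecutive_days(dows: List[str], day_order: List[str]) -> bool:
--     """Check if a list of day-of-week codes are consecutive."""
--     if len(dows) <= 1:
--         return True
--
--     indices = [day_order.index(d) for d in dows]
--     indices.sort()
--
--     for i in range(len(indices) - 1):
--         if indices[i + 1] != indices[i] + 1:
--             return False
--
--     return True
-- ===== SOURCE B (Python) =====
-- def _are_consecutive_days(dows, day_order):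
--     """Check if a list of day-of-week codes are consecutive."""
--     if len(dows) <= 1:
--         return True
--     indices = [day_order.index(d) for d in dows]
--     return len(set(indices)) == len(indices) and max(indices) - min(indices) == len(indices) - 1
-- ===== Notes on version B (the rewrite author's own statement) =====
-- stated objective: simpler
-- what changed: Replaced the sort plus adjacent-pair scan with a closed-form contiguity test: the indices are consecutive iff they are pairwise distinct (len(set)==len) and max-min equals len-1.
import Mathlib
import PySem

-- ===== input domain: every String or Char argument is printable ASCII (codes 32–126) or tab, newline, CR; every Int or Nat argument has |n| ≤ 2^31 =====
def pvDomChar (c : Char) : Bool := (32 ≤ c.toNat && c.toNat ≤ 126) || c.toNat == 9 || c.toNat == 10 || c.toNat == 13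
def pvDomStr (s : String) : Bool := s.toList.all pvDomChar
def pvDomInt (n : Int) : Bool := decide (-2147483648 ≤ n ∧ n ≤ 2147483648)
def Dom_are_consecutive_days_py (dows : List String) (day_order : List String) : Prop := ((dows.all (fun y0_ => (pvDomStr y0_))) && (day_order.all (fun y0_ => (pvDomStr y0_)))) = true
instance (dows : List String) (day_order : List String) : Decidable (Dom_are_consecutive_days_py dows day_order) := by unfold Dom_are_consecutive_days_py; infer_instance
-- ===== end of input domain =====

-- B replaces A's sort + adjacent-pair scan by the closed-form contiguity test
-- "all indices distinct and max - min = len - 1" (objective: simpler).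

-- ===== PORT A =====
-- the comprehension [day_order.index(d) for d in dows]; none = ValueError (excluded by Pre_)
def pvIdxList (day_order : List String) : List String → Option (List Nat)
  | [] => some []
  | d :: rest =>
    match PySem.List.index? day_order d, pvIdxList day_order rest with
    | some i, some t => some (i :: t)
    | _, _ => none

-- A's loop "for i in range(len(indices)-1): if indices[i+1] != indices[i]+1: return False"
def pvChainA : List Nat → Bool
  | a :: b :: rest => if b ≠ a + 1 then false else pvChainA (b :: rest)
  | _ => true

def are_consecutive_days_py (dows : List String) (day_order : List String) : Bool :=
  if dows.length ≤ 1 then true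
  else
    match pvIdxList day_order dows with
    | none => false   -- ValueError; outside Pre_
    | some indices => pvChainA (PySem.List.sorted indices (fun x => x) false)

-- ===== PORT B =====
def are_consecutive_days_py_alt (dows : List String) (day_order : List String) : Bool :=
  if dows.length ≤ 1 then true
  else
    match pvIdxList day_order dows with
    | none => false   -- ValueError; outside Pre_
    | some indices =>
      ((PySem.Set.ofList indices).length == indices.length)
        && (match PySem.List.max? indices (fun x => x), PySem.List.min? indices (fun x => x) with
            | some mx, some mn => mx - mn == indices.length - 1
            | _, _ => false)

-- ===== PRECONDITION & SPEC =====
-- Pre_ excludes exactly the inputs on which A raises ValueError: more than one day code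
-- while some code is absent from day_order (B raises there identically).
def Pre_are_consecutive_days_py (dows : List String) (day_order : List String) : Prop :=
  dows.length ≤ 1 ∨ ∀ d ∈ dows, d ∈ day_order
instance (dows : List String) (day_order : List String) : Decidable (Pre_are_consecutive_days_py dows day_order) := by unfold Pre_are_consecutive_days_py; infer_instance

def pvWitness_are_consecutive_days_py : List String × List String :=
  (["MO", "TU"], ["MO", "TU", "WE"])

def Spec_are_consecutive_days_py (dows : List String) (day_order : List String) (out : Bool) : Prop := out = are_consecutive_days_py_alt dows day_order
instance (dows : List String) (day_order : List String) (out : Bool) : Decidable (Spec_are_consecutive_days_py dows day_order out) := by unfold Spec_are_consecutive_days_py; infer_instance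

-- ===== CLAIM (what is proved, stated in full; the proofs are below) =====
def Claim_equal_are_consecutive_days_py : Prop := ∀ (dows : List String) (day_order : List String), Dom_are_consecutive_days_py dows day_order → Pre_are_consecutive_days_py dows day_order → Spec_are_consecutive_days_py dows day_order (are_consecutive_days_py dows day_order)

-- ===== LEMMAS AND PROOFS =====

lemma pvIdxList_isSome (day_order : List String) (dows : List String)
    (h : ∀ d ∈ dows, d ∈ day_order) : ∃ ixs, pvIdxList day_order dows = some ixs := by
  induction dows with
  | nil => exact ⟨[], rfl⟩
  | cons d rest ih =>
    obtain ⟨t, ht⟩ := ih (fun x hx => h x (List.mem_cons_of_mem _ hx))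
    have hd : d ∈ day_order := h d (List.mem_cons_self ..)
    obtain ⟨i, hi⟩ := Option.isSome_iff_exists.mp
      ((PySem.List.index?_isSome_iff day_order d).mpr hd)
    exact ⟨i :: t, by simp only [pvIdxList, hi, ht]⟩

lemma pvIdxList_length (day_order : List String) (dows : List String) (ixs : List Nat)
    (h : pvIdxList day_order dows = some ixs) : ixs.length = dows.length := by
  induction dows generalizing ixs with
  | nil => simp only [pvIdxList, Option.some.injEq] at h; subst h; rfl
  | cons d rest ih =>
    simp only [pvIdxList] at h
    cases hidx : PySem.List.index? day_order d with
    | none => rw [hidx] at h; exact absurd h (by simp)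
    | some i =>
      rw [hidx] at h
      cases hrest : pvIdxList day_order rest with
      | none => rw [hrest] at h; exact absurd h (by simp)
      | some t =>
        rw [hrest] at h
        simp only [Option.some.injEq] at h
        subst h
        simp [ih t hrest]

lemma pvChainA_iff_range' (t : List Nat) : ∀ a : Nat,
    (pvChainA (a :: t) = true ↔ a :: t = List.range' a (t.length + 1)) := by
  induction t with
  | nil => intro a; simp [pvChainA, List.range'_succ]
  | cons b t' ih =>
    intro a
    by_cases hb : b = a + 1
    · subst hb
      rw [show pvChainA (a :: (a + 1) :: t') = pvChainA ((a + 1) :: t') by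
            simp [pvChainA]]
      rw [ih (a + 1)]
      simp [List.range'_succ]
    · rw [show pvChainA (a :: b :: t') = false by simp [pvChainA, hb]]
      rw [List.range'_succ]
      simp [List.range'_succ, hb]

-- strictly increasing Nat list grows at least by one per step
lemma pvGrowth (s : List Nat) (hp : s.Pairwise (· < ·)) :
    ∀ j (hj : j < s.length) i (hij : i ≤ j), s[i]'(by omega) + (j - i) ≤ s[j] := by
  have hlt : ∀ i j (hi : i < j) (hj : j < s.length), s[i]'(by omega) < s[j] :=
    fun i j hi hj => List.pairwise_iff_getElem.mp hp i j (by omega) hj hi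
  intro j
  induction j with
  | zero => intro hj i hij; interval_cases i; simp
  | succ j ihj =>
    intro hj i hij
    rcases Nat.lt_or_ge i (j + 1) with hlt' | hge
    · have h1 := ihj (by omega) i (by omega)
      have h2 := hlt j (j + 1) (by omega) hj
      omega
    · have : i = j + 1 := by omega
      subst this; simp

-- the heart: A's sorted adjacent-pair scan equals B's distinct + range test
lemma pvCore (ixs : List Nat) (h2 : 2 ≤ ixs.length) :
    pvChainA (PySem.List.sorted ixs (fun x => x) false)
      = (((PySem.Set.ofList ixs).length == ixs.length)
          && (match PySem.List.max? ixs (fun x => x), PySem.List.min? ixs (fun x => x) with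
              | some mx, some mn => mx - mn == ixs.length - 1
              | _, _ => false)) := by
  have hperm : (PySem.List.sorted ixs (fun x => x) false).Perm ixs := PySem.List.sorted_perm ..
  have hne : ixs ≠ [] := by intro h; rw [h] at h2; simp at h2
  obtain ⟨mx, hmx⟩ : ∃ mx, PySem.List.max? ixs (fun x => x) = some mx := by
    cases h : PySem.List.max? ixs (fun x => x) with
    | none => exact absurd ((PySem.List.max?_eq_none_iff ..).mp h) hne
    | some mx => exact ⟨mx, rfl⟩
  obtain ⟨mn, hmn⟩ : ∃ mn, PySem.List.min? ixs (fun x => x) = some mn := by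
    cases h : PySem.List.min? ixs (fun x => x) with
    | none => exact absurd ((PySem.List.min?_eq_none_iff ..).mp h) hne
    | some mn => exact ⟨mn, rfl⟩
  have hmxmem : mx ∈ ixs := PySem.List.max?_mem hmx
  have hmnmem : mn ∈ ixs := PySem.List.min?_mem hmn
  have hmxmax : ∀ y ∈ ixs, y ≤ mx := fun y hy => PySem.List.max?_isMax hmx y hy
  have hmnmin : ∀ y ∈ ixs, mn ≤ y := fun y hy => PySem.List.min?_isMin hmn y hy
  have hple : (PySem.List.sorted ixs (fun x => x) false).Pairwise (· ≤ ·) :=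
    PySem.List.sorted_pairwise ..
  obtain ⟨a, t, hs⟩ : ∃ a tl, PySem.List.sorted ixs (fun x => x) false = a :: tl := by
    cases h : PySem.List.sorted ixs (fun x => x) false with
    | nil =>
      exact absurd ((PySem.List.sorted_eq_nil_iff ..).mp h) hne
    | cons a tl => exact ⟨a, tl, rfl⟩
  have hhead : ∀ y ∈ ixs, a ≤ y := PySem.List.key_head_sorted_le ixs (fun x => x) hs
  rw [hs] at hperm hple
  have hlen' : t.length + 1 = ixs.length := by
    have := hperm.length_eq; simpa using this
  have hamem : a ∈ ixs := hperm.mem_iff.mp (List.mem_cons_self ..)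
  rw [hmx, hmn, hs, Bool.eq_iff_iff]
  simp only [Bool.and_eq_true, beq_iff_eq]
  rw [pvChainA_iff_range']
  constructor
  · -- sorted is a consecutive run → distinct and max-min = len-1
    intro hrange
    have hpermr : ixs.Perm (List.range' a (t.length + 1)) := by
      rw [← hrange]; exact hperm.symm
    have hnd : ixs.Nodup := hpermr.nodup_iff.mpr (List.nodup_range' 1)
    refine ⟨by rw [PySem.Set.ofList_eq_self_of_nodup ixs hnd], ?_⟩
    have htop : a + t.length ∈ ixs := hpermr.mem_iff.mpr (by rw [List.mem_range'_1]; omega)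
    have h1 : a + t.length ≤ mx := hmxmax _ htop
    have h2' : mx < a + (t.length + 1) := (List.mem_range'_1.mp (hpermr.mem_iff.mp hmxmem)).2
    have h3 : a ≤ mn := hhead mn hmnmem
    have h4 : mn ≤ a := hmnmin a hamem
    omega
  · -- distinct and max-min = len-1 → sorted is a consecutive run
    rintro ⟨hlenof, hrange⟩
    have hnd : ixs.Nodup := by
      have hsub : PySem.Set.ofList ixs ⊆ ixs := fun x hx => (PySem.Set.mem_ofList ..).mp hx
      have hsp : List.Subperm (PySem.Set.ofList ixs) ixs :=
        (PySem.Set.nodup_ofList ixs).subperm hsub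
      have hp2 : (PySem.Set.ofList ixs).Perm ixs := hsp.perm_of_length_le (by omega)
      exact hp2.symm.nodup_iff.mpr (PySem.Set.nodup_ofList ixs)
    have hsnd : (a :: t).Nodup := hperm.nodup_iff.mpr hnd
    have hplt : (a :: t).Pairwise (· < ·) :=
      (hple.and hsnd).imp (fun h => lt_of_le_of_ne h.1 h.2)
    have hmns : a = mn := le_antisymm (hhead mn hmnmem) (hmnmin a hamem)
    have hmnmx : mn ≤ mx := hmnmin mx hmxmem
    have hgrow := pvGrowth (a :: t) hplt
    have hlast : (a :: t)[t.length]'(by simp) ≤ mx :=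
      hmxmax _ (hperm.mem_iff.mp (List.getElem_mem _))
    apply List.ext_getElem (by simp)
    intro i hi1 hi2
    have hi : i < (a :: t).length := hi1
    have ha0 : (a :: t)[0]'(by simp) = a := rfl
    have hlow : a + i ≤ (a :: t)[i]'hi := by
      have := hgrow i hi 0 (by omega); simpa using this
    have hhigh : (a :: t)[i]'hi ≤ a + i := by
      have h1 := hgrow t.length (by simp) i (by simp at hi1; omega)
      omega
    rw [List.getElem_range']
    omega

-- ===== VERDICT (by name: the statement is the Claim_ definition above) =====
theorem are_consecutive_days_py_spec : Claim_equal_are_consecutive_days_py := by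
  intro dows day_order _ hpre
  unfold Spec_are_consecutive_days_py are_consecutive_days_py are_consecutive_days_py_alt
  by_cases hlen : dows.length ≤ 1
  · simp [hlen]
  · simp only [hlen, if_false]
    have hall : ∀ d ∈ dows, d ∈ day_order := by
      rcases hpre with h | h
      · omega
      · exact h
    obtain ⟨ixs, hix⟩ := pvIdxList_isSome day_order dows hall
    rw [hix]
    exact pvCore ixs (by have := pvIdxList_length day_order dows ixs hix; omega)
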